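-- pv_equiv track=rewrite | github.com/governance-evidence/decision-trace-reconstructor | src/reconstructor/adapters/generic_jsonl/yaml.py | _strip_yaml_comment
-- ===== SOURCE A (Python) =====
-- def _strip_yaml_comment(line: str) -> str:
--     in_single = False
--     in_double = False
--     for index, char in enumerate(line):
--         if char == "'" and not in_double:
--             in_single = not in_single
--         elif char == '"' and not in_single:
--             in_double = not in_double
--         elif char == "#" and not in_single and not in_double:
--             return line[:index]
--     return line
-- ===== SOURCE B (Python) =====
-- def _strip_yaml_comment(line: str) -> str:
--     # Span-jumping scan: on a quote, jump past the matching close quote (or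
--     # to end of line if unclosed); stop at the first top-level '#'.
--     i = 0
--     n = len(line)
--     while i < n:
--         c = line[i]
--         if c == "#":
--             return line[:i]
--         if c == "'" or c == '"':
--             j = line.find(c, i + 1)
--             i = n if j < 0 else j + 1
--         else:
--             i += 1
--     return line
-- ===== Notes on version B (the rewrite author's own statement) =====
-- stated objective: simpler
-- what changed: Replaces the per-character two-flag state machine with a span-jumping scan that uses str.find to skip over an entire quoted span at once and stops at the first top-level comment marker.
import Mathlib
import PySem

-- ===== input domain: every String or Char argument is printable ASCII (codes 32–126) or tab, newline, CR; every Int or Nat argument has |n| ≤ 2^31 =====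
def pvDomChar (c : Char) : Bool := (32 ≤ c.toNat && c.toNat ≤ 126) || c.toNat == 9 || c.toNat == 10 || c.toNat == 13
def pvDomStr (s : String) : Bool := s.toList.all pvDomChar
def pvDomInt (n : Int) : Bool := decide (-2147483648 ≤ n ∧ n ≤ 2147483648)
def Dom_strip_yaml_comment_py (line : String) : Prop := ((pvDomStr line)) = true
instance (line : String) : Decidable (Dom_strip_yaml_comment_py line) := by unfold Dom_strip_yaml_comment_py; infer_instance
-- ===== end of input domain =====

-- B replaces A's two-flag per-character state machine by a span-jumping scan
-- (jump past each whole quoted span via find, stop at the first top-level comment marker);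
-- objective: simpler.

-- ===== PORT A =====
-- A's for-loop with flags in_single/in_double, early return line[:index].
def stripAGo (full : List Char) (idx : Nat) (insg indb : Bool) : List Char → List Char
  | [] => full
  | c :: cs =>
    if c = '\'' && !indb then stripAGo full (idx + 1) (!insg) indb cs
    else if c = '"' && !insg then stripAGo full (idx + 1) insg (!indb) cs
    else if c = '#' && !insg && !indb then full.take idx
    else stripAGo full (idx + 1) insg indb cs

def strip_yaml_comment_py (line : String) : String :=
  String.mk (stripAGo line.toList 0 false false line.toList)

-- ===== PORT B =====
-- B's while-loop over index i; on a quote, line.find(c, i+1) is ported as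
-- findIdx? on the dropped suffix (exact: first occurrence at position ≥ i+1,
-- none = -1). 'i = n' followed by loop exit is ported as returning full directly.
def stripBGo (full : List Char) (i : Nat) : List Char :=
  match h : full[i]? with
  | none => full
  | some c =>
    if c = '#' then full.take i
    else if c = '\'' ∨ c = '"' then
      match (full.drop (i + 1)).findIdx? (· = c) with
      | none => full
      | some k => stripBGo full (i + 1 + k + 1)
    else stripBGo full (i + 1)
termination_by full.length - i
decreasing_by
  · have : i < full.length := by
      by_contra hge
      simp [List.getElem?_eq_none (le_of_not_gt hge)] at h
    omega
  · have : i < full.length := by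
      by_contra hge
      simp [List.getElem?_eq_none (le_of_not_gt hge)] at h
    omega

def strip_yaml_comment_py_alt (line : String) : String :=
  String.mk (stripBGo line.toList 0)

-- ===== PRECONDITION & SPEC =====
def Spec_strip_yaml_comment_py (line : String) (out : String) : Prop := out = strip_yaml_comment_py_alt line
instance (line : String) (out : String) : Decidable (Spec_strip_yaml_comment_py line out) := by unfold Spec_strip_yaml_comment_py; infer_instance

-- ===== CLAIM (what is proved, stated in full; the proofs are below) =====
def Claim_equal_strip_yaml_comment_py : Prop := ∀ (line : String), Dom_strip_yaml_comment_py line → Spec_strip_yaml_comment_py line (strip_yaml_comment_py line)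

-- ===== LEMMAS AND PROOFS =====

-- Inside a single-quoted span, A ignores everything until the closing quote.
lemma skip_single (cs : List Char) : ∀ (full : List Char) (idx : Nat),
    stripAGo full idx true false cs =
      match cs.findIdx? (· = '\'') with
      | none => full
      | some k => stripAGo full (idx + k + 1) false false (cs.drop (k + 1)) := by
  induction cs with
  | nil => intro full idx; simp [stripAGo]
  | cons c cs ih =>
    intro full idx
    by_cases hc : c = '\''
    · subst hc
      simp [stripAGo, List.findIdx?_cons]
    · rw [List.findIdx?_cons]
      simp only [hc, decide_false, if_false]
      have hA : stripAGo full idx true false (c :: cs) = stripAGo full (idx + 1) true false cs := by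
        simp [stripAGo, hc]
      rw [hA, ih]
      cases h : cs.findIdx? (· = '\'') with
      | none => simp
      | some k =>
        simp only [Option.map_some]
        have : idx + 1 + k + 1 = idx + (k + 1) + 1 := by omega
        rw [this]
        rfl

-- Inside a double-quoted span, symmetric.
lemma skip_double (cs : List Char) : ∀ (full : List Char) (idx : Nat),
    stripAGo full idx false true cs =
      match cs.findIdx? (· = '"') with
      | none => full
      | some k => stripAGo full (idx + k + 1) false false (cs.drop (k + 1)) := by
  induction cs with
  | nil => intro full idx; simp [stripAGo]
  | cons c cs ih =>
    intro full idx
    by_cases hc : c = '"'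
    · subst hc
      simp [stripAGo, List.findIdx?_cons]
    · rw [List.findIdx?_cons]
      simp only [hc, decide_false, if_false]
      have hA : stripAGo full idx false true (c :: cs) = stripAGo full (idx + 1) false true cs := by
        simp [stripAGo, hc]
      rw [hA, ih]
      cases h : cs.findIdx? (· = '"') with
      | none => simp
      | some k =>
        simp only [Option.map_some]
        have : idx + 1 + k + 1 = idx + (k + 1) + 1 := by omega
        rw [this]
        rfl

lemma stripA_eq_stripB (n : Nat) : ∀ (full : List Char) (idx : Nat), full.length ≤ idx + n →
    stripAGo full idx false false (full.drop idx) = stripBGo full idx := by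
  induction n with
  | zero =>
    intro full idx hle
    have hdrop : full.drop idx = [] := List.drop_eq_nil_of_le (by omega)
    have hget : full[idx]? = none := List.getElem?_eq_none (by omega)
    rw [hdrop, stripBGo, hget]
    rfl
  | succ n ih =>
    intro full idx hle
    cases hget : full[idx]? with
    | none =>
      have hidx : full.length ≤ idx := by
        by_contra hgt
        simp [List.getElem?_eq_getElem (lt_of_not_ge hgt)] at hget
      have hdrop : full.drop idx = [] := List.drop_eq_nil_of_le hidx
      rw [hdrop, stripBGo, hget]
      rfl
    | some c =>
      have hidx : idx < full.length := by
        by_contra hge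
        simp [List.getElem?_eq_none (le_of_not_gt hge)] at hget
      have hceq : full[idx] = c := by
        have := List.getElem?_eq_getElem hidx
        rw [hget] at this; exact (Option.some.inj this).symm
      have hdrop : full.drop idx = c :: full.drop (idx + 1) := by
        rw [List.drop_eq_getElem_cons hidx, hceq]
      rw [hdrop, stripBGo, hget]
      by_cases h1 : c = '\''
      · subst h1
        simp only [stripAGo, decide_true, Bool.not_false, Bool.and_true, if_pos rfl]
        rw [skip_single]
        simp only [if_neg (by decide : ¬ ('\'' = '#')), if_pos (Or.inl rfl)]
        cases hf : (full.drop (idx + 1)).findIdx? (· = '\'') with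
        | none => rfl
        | some k =>
          have hdd : (full.drop (idx + 1)).drop (k + 1) = full.drop (idx + 1 + k + 1) := by
            rw [List.drop_drop]; ring_nf
          simp only [hdd]
          rw [if_pos trivial, if_pos (Or.inl trivial)]
          exact ih full (idx + 1 + k + 1) (by omega)
      · by_cases h2 : c = '"'
        · subst h2
          simp only [stripAGo, if_neg (by decide : ¬(('"' = '\'') && !false = true)),
            decide_true, Bool.not_false, Bool.and_true, if_pos rfl]
          rw [skip_double]
          simp only [if_neg (by decide : ¬ ('"' = '#')), if_pos (Or.inr rfl)]
          cases hf : (full.drop (idx + 1)).findIdx? (· = '"') with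
          | none => rfl
          | some k =>
            have hdd : (full.drop (idx + 1)).drop (k + 1) = full.drop (idx + 1 + k + 1) := by
              rw [List.drop_drop]; ring_nf
            simp only [hdd]
            rw [if_neg (by decide : ¬(decide ('"' = '\'') = true)), if_pos trivial,
              if_pos (Or.inr trivial)]
            exact ih full (idx + 1 + k + 1) (by omega)
        · by_cases h3 : c = '#'
          · subst h3
            simp [stripAGo]
          · have hA : stripAGo full idx false false (c :: full.drop (idx + 1)) =
                stripAGo full (idx + 1) false false (full.drop (idx + 1)) := by
              simp [stripAGo, h1, h2, h3]
            rw [hA, ih full (idx + 1) (by omega)]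
            simp [h3, h1, h2]

-- ===== VERDICT (by name: the statement is the Claim_ definition above) =====
theorem strip_yaml_comment_py_spec : Claim_equal_strip_yaml_comment_py := by
  intro line _
  unfold Spec_strip_yaml_comment_py strip_yaml_comment_py strip_yaml_comment_py_alt
  have := stripA_eq_stripB line.toList.length line.toList 0 (by omega)
  rw [List.drop_zero] at this
  rw [this]
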